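-- pv_equiv track=rewrite | github.com/Tejas-P-Herle/HP_Enterprise_CodeWar_2015 | prob12.py | find_max_val
-- ===== SOURCE A (Python) =====
-- def find_max_val(data):
--     if not data:
--         return None
--     _max = max(data)
--     _min = min(data)
--     if data.index(_max) > data.index(_min):
--         return _max - _min
--     else:
--         data.remove(_max)
--         return find_max_val(data)
-- ===== SOURCE B (Python) =====
-- def find_max_val(data):
--     if not data:
--         return None
--     m = min(data)
--     tail = data[data.index(m) + 1:]
--     if not tail:
--         return None
--     M = max(tail)
--     return M - m if M > m else None
-- ===== Notes on version B (the rewrite author's own statement) =====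
-- stated objective: faster
-- what changed: A repeatedly removes the global max and recurses (O(n^2) worst case); B does one min/index/max pass: it takes the slice after the first occurrence of the minimum and returns its max minus the min when that max exceeds the min, else None.
import Mathlib
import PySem

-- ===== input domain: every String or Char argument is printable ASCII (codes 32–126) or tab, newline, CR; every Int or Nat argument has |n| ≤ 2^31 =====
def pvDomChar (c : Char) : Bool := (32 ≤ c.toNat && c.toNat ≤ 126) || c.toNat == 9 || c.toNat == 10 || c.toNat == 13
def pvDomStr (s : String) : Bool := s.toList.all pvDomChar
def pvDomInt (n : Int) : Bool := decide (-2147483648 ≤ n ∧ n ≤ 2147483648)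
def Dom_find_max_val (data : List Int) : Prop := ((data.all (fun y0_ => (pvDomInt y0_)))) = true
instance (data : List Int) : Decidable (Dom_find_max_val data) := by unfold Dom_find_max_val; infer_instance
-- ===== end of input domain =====

-- B replaces A's O(n^2) repeated remove-the-max recursion by one min/index/max pass (O(n)).
-- A mutates its argument in place (data.remove); B does not — the equivalence proved is about the RETURN value only.

-- ===== PORT A =====
def find_max_val (data : List Int) : Option Int :=
  if _h : data.isEmpty then none
  else
    let _max := (PySem.List.max? data (fun y => y)).getD 0
    let _min := (PySem.List.min? data (fun y => y)).getD 0
    if (PySem.List.index? data _max).getD 0 > (PySem.List.index? data _min).getD 0 then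
      some (_max - _min)
    else
      find_max_val ((PySem.List.remove? data _max).getD [])
termination_by data.length
decreasing_by
  have hne : data ≠ [] := by simpa [List.isEmpty_iff] using _h
  obtain ⟨x, t, rfl⟩ := List.exists_cons_of_ne_nil hne
  have hmax : PySem.List.max? (x :: t) (fun y => y) = some (t.foldl max x) :=
    PySem.List.max?_id_cons x t
  have hmem : (PySem.List.max? (x :: t) (fun y => y)).getD 0 ∈ (x :: t) := by
    rw [hmax]
    rcases PySem.List.foldl_max_mem t x with h | h
    · simp [h]
    · exact List.mem_cons_of_mem _ h
  have hrm := PySem.List.remove?_eq_some_erase _ _ hmem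
  rw [hrm]
  have hlen := List.length_erase_of_mem hmem
  simp only [Option.getD_some] ; rw [hlen]
  simp

-- ===== PORT B =====
def find_max_val_alt (data : List Int) : Option Int :=
  if data.isEmpty then none
  else
    let m := (PySem.List.min? data (fun y => y)).getD 0
    let tail := PySem.List.slice data (some (((PySem.List.index? data m).getD 0 : Int) + 1)) none
    if tail.isEmpty then none
    else
      let M := (PySem.List.max? tail (fun y => y)).getD 0
      if M > m then some (M - m) else none

-- ===== PRECONDITION & SPEC =====
def Spec_find_max_val (data : List Int) (out : Option Int) : Prop := out = find_max_val_alt data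
instance (data : List Int) (out : Option Int) : Decidable (Spec_find_max_val data out) := by unfold Spec_find_max_val; infer_instance

-- ===== CLAIM (what is proved, stated in full; the proofs are below) =====
def Claim_equal_find_max_val : Prop := ∀ (data : List Int), Dom_find_max_val data → Spec_find_max_val data (find_max_val data)

-- ===== LEMMAS AND PROOFS =====

-- proof-only helper: the body of find_max_val_alt after min/index are resolved
def altCore (m : Int) (tail : List Int) : Option Int :=
  if tail.isEmpty then none
  else if (PySem.List.max? tail (fun y => y)).getD 0 > m then
    some ((PySem.List.max? tail (fun y => y)).getD 0 - m)
  else none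

lemma alt_eq (data : List Int) (m : Int) (pm : Nat)
    (hne : data ≠ []) (hm : PySem.List.min? data (fun y => y) = some m)
    (hi : PySem.List.index? data m = some pm) :
    find_max_val_alt data = altCore m (data.drop (pm + 1)) := by
  unfold find_max_val_alt altCore
  have h1 : ((pm : Int) + 1).toNat = pm + 1 := by omega
  have h2 : (0:Int) ≤ (pm : Int) + 1 := by positivity
  simp only [List.isEmpty_iff, hne, hm, hi, Option.getD_some,
    PySem.List.slice_from _ h2, h1]
  simp

-- all elements equal ⇒ B returns none
lemma alt_const (l : List Int) (c : Int) (h : ∀ y ∈ l, y = c) :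
    find_max_val_alt l = none := by
  rcases eq_or_ne l [] with rfl | hne
  · simp [find_max_val_alt]
  · obtain ⟨m, hm⟩ : ∃ m, PySem.List.min? l (fun y => y) = some m := by
      rcases hx : PySem.List.min? l (fun y => y) with _ | m
      · exact absurd (((PySem.List.min?_eq_none_iff _ _).mp hx)) hne
      · exact ⟨m, rfl⟩
    have hmem := PySem.List.min?_mem hm
    obtain ⟨pm, hi⟩ : ∃ pm, PySem.List.index? l m = some pm := by
      rcases hx : PySem.List.index? l m with _ | pm
      · exact absurd ((PySem.List.index?_eq_none_iff _ _).mp hx) (by simp [hmem])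
      · exact ⟨pm, rfl⟩
    rw [alt_eq l m pm hne hm hi]
    unfold altCore
    rcases eq_or_ne (l.drop (pm + 1)) [] with hnil | htne
    · simp [hnil]
    · obtain ⟨Mt, hMt⟩ : ∃ Mt, PySem.List.max? (l.drop (pm + 1)) (fun y => y) = some Mt := by
        rcases hx : PySem.List.max? (l.drop (pm + 1)) (fun y => y) with _ | Mt
        · exact absurd (((PySem.List.max?_eq_none_iff _ _).mp hx)) htne
        · exact ⟨Mt, rfl⟩
      have hMc : Mt = c := h _ (List.mem_of_mem_drop (PySem.List.max?_mem hMt))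
      have hmc : m = c := h _ hmem
      simp [List.isEmpty_iff, htne, hMt, hMc, hmc]

-- the returning case: first max strictly after first min ⇒ B gives max - min
lemma alt_of_gt (data : List Int) (M m : Int) (pM pm : Nat)
    (hne : data ≠ [])
    (hM : PySem.List.max? data (fun y => y) = some M)
    (hm : PySem.List.min? data (fun y => y) = some m)
    (hiM : PySem.List.index? data M = some pM)
    (him : PySem.List.index? data m = some pm)
    (hgt : pm < pM) :
    find_max_val_alt data = some (M - m) := by
  have hMmem := PySem.List.max?_mem hM
  have hmM : m < M := by
    rcases lt_or_eq_of_le (PySem.List.min?_isMin hm M hMmem) with h | h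
    · exact h
    · exfalso
      rw [h] at him
      rw [him] at hiM
      simp only [Option.some.injEq] at hiM
      omega
  obtain ⟨pre, suf, hdec, hlen, _⟩ := (PySem.List.index?_eq_some_iff _ _ _).mp hiM
  have htail : data.drop (pm + 1) = pre.drop (pm + 1) ++ M :: suf := by
    rw [hdec]; exact List.drop_append_of_le_length (by omega)
  have hMtail : M ∈ data.drop (pm + 1) := by rw [htail]; simp
  rw [alt_eq data m pm hne hm him]
  unfold altCore
  have htne : data.drop (pm + 1) ≠ [] := List.ne_nil_of_mem hMtail
  obtain ⟨Mt, hMt⟩ : ∃ Mt, PySem.List.max? (data.drop (pm + 1)) (fun y => y) = some Mt := by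
    rcases hx : PySem.List.max? (data.drop (pm + 1)) (fun y => y) with _ | Mt
    · exact absurd ((PySem.List.max?_eq_none_iff _ _).mp hx) htne
    · exact ⟨Mt, rfl⟩
  have h1 : Mt ≤ M := PySem.List.max?_isMax hM Mt (List.mem_of_mem_drop (PySem.List.max?_mem hMt))
  have h2 : M ≤ Mt := PySem.List.max?_isMax hMt M hMtail
  have hMtM : Mt = M := le_antisymm h1 h2
  simp [List.isEmpty_iff, htne, hMt, hMtM, hmM]

-- the recursive case: first max not after first min ⇒ erasing the max keeps B's value
lemma alt_erase (data : List Int) (M m : Int) (pM pm : Nat)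
    (hne : data ≠ [])
    (hM : PySem.List.max? data (fun y => y) = some M)
    (hm : PySem.List.min? data (fun y => y) = some m)
    (hiM : PySem.List.index? data M = some pM)
    (him : PySem.List.index? data m = some pm)
    (hle : pM ≤ pm) :
    find_max_val_alt (data.erase M) = find_max_val_alt data := by
  have hMmem := PySem.List.max?_mem hM
  by_cases hMm : M = m
  · -- all elements equal: both sides are none
    have hall : ∀ y ∈ data, y = m := by
      intro y hy
      have h1 : y ≤ M := PySem.List.max?_isMax hM y hy
      have h2 : m ≤ y := PySem.List.min?_isMin hm y hy
      omega
    rw [alt_const data m hall,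
        alt_const (data.erase M) m (fun y hy => hall y (List.mem_of_mem_erase hy))]
  · -- m < M; the erased max sits strictly before the first min
    have hmM : m < M :=
      lt_of_le_of_ne (PySem.List.min?_isMin hm M hMmem) (Ne.symm hMm)
    have hpMpm : pM < pm := by
      rcases lt_or_eq_of_le hle with h | h
      · exact h
      · exfalso
        obtain ⟨hk1, hv1, _⟩ := PySem.List.getElem_of_index?_eq_some hiM
        obtain ⟨hk2, hv2, _⟩ := PySem.List.getElem_of_index?_eq_some him
        subst h
        exact hMm (hv1 ▸ hv2 ▸ rfl)
    obtain ⟨pre, suf, hdM, hlM, hnM⟩ := (PySem.List.index?_eq_some_iff _ _ _).mp hiM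
    obtain ⟨prem, sufm, hdm, hlm, hnm⟩ := (PySem.List.index?_eq_some_iff _ _ _).mp him
    -- pre is the first pM elements of prem
    have hpre : pre = prem.take pM := by
      have h1 : (pre ++ M :: suf).take pM = pre := by
        rw [← hlM]; exact List.take_left
      have h2 : (prem ++ m :: sufm).take pM = prem.take pM :=
        List.take_append_of_le_length (by omega)
      rw [hdM] at hdm
      rw [← h1, hdm, h2]
    -- suf is (the rest of prem) ++ m :: sufm
    have hsuf : suf = prem.drop (pM + 1) ++ m :: sufm := by
      have h1 : data.drop (pM + 1) = suf := by
        rw [hdM, ← hlM]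
        have : pre.length + 1 = (pre ++ [M]).length := by simp
        rw [this, show pre ++ M :: suf = (pre ++ [M]) ++ suf by simp, List.drop_left]
      have h2 : data.drop (pM + 1) = prem.drop (pM + 1) ++ m :: sufm := by
        rw [hdm]; exact List.drop_append_of_le_length (by omega)
      rw [← h1, h2]
    -- erasing M from data
    have herase : data.erase M = pre ++ suf := by
      rw [hdM, List.erase_append_right _ hnM, List.erase_cons_head]
    -- the new list, regrouped around the first min
    have hregroup : pre ++ suf = (pre ++ prem.drop (pM + 1)) ++ m :: sufm := by
      rw [hsuf]; simp
    have hlen2 : (pre ++ prem.drop (pM + 1)).length = pm - 1 := by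
      simp [hlM, hlm]; omega
    have hmem_sub : ∀ y ∈ pre ++ suf, y ∈ data := by
      intro y hy
      rw [hdM]
      rcases List.mem_append.mp hy with h | h
      · exact List.mem_append_left _ h
      · exact List.mem_append_right _ (List.mem_cons_of_mem _ h)
    have hmmem2 : m ∈ pre ++ suf := by
      rw [hregroup]; simp
    have hne2 : pre ++ suf ≠ [] := List.ne_nil_of_mem hmmem2
    -- min of the erased list is still m
    have hm2 : PySem.List.min? (pre ++ suf) (fun y => y) = some m := by
      obtain ⟨m', hm'⟩ : ∃ m', PySem.List.min? (pre ++ suf) (fun y => y) = some m' := by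
        rcases hx : PySem.List.min? (pre ++ suf) (fun y => y) with _ | m'
        · exact absurd ((PySem.List.min?_eq_none_iff _ _).mp hx) hne2
        · exact ⟨m', rfl⟩
      have h1 : m ≤ m' := PySem.List.min?_isMin hm m' (hmem_sub _ (PySem.List.min?_mem hm'))
      have h2 : m' ≤ m := PySem.List.min?_isMin hm' m hmmem2
      rw [hm', le_antisymm h2 h1]
    -- first index of m in the erased list is pm - 1
    have hnotin2 : m ∉ pre ++ prem.drop (pM + 1) := by
      intro h
      rcases List.mem_append.mp h with h | h
      · rw [hpre] at h
        exact hnm (List.mem_of_mem_take h)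
      · exact hnm (List.mem_of_mem_drop h)
    have hi2 : PySem.List.index? (pre ++ suf) m = some (pm - 1) :=
      (PySem.List.index?_eq_some_iff _ _ _).mpr
        ⟨pre ++ prem.drop (pM + 1), sufm, hregroup, hlen2, hnotin2⟩
    -- both sides reduce to the same core: min m, tail sufm
    have hdrop2 : (pre ++ suf).drop ((pm - 1) + 1) = sufm := by
      rw [hregroup, ← hlen2]
      have : (pre ++ prem.drop (pM + 1)).length + 1
           = ((pre ++ prem.drop (pM + 1)) ++ [m]).length := by simp; omega
      rw [this, show (pre ++ prem.drop (pM + 1)) ++ m :: sufm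
            = ((pre ++ prem.drop (pM + 1)) ++ [m]) ++ sufm by simp, List.drop_left]
    have hdrop1 : data.drop (pm + 1) = sufm := by
      rw [hdm, ← hlm]
      have : prem.length + 1 = (prem ++ [m]).length := by simp
      rw [this, show prem ++ m :: sufm = (prem ++ [m]) ++ sufm by simp, List.drop_left]
    rw [herase, alt_eq (pre ++ suf) m (pm - 1) hne2 hm2 hi2,
        alt_eq data m pm hne hm him, hdrop1, hdrop2]

lemma resolve (data : List Int) (h : ¬ data.isEmpty = true) :
    ∃ (M m : Int) (pM pm : Nat), data ≠ [] ∧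
      PySem.List.max? data (fun y => y) = some M ∧
      PySem.List.min? data (fun y => y) = some m ∧
      PySem.List.index? data M = some pM ∧
      PySem.List.index? data m = some pm := by
  have hne : data ≠ [] := by simpa [List.isEmpty_iff] using h
  obtain ⟨M, hM⟩ : ∃ M, PySem.List.max? data (fun y => y) = some M := by
    rcases hx : PySem.List.max? data (fun y => y) with _ | M
    · exact absurd ((PySem.List.max?_eq_none_iff _ _).mp hx) hne
    · exact ⟨M, rfl⟩
  obtain ⟨m, hm⟩ : ∃ m, PySem.List.min? data (fun y => y) = some m := by
    rcases hx : PySem.List.min? data (fun y => y) with _ | m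
    · exact absurd ((PySem.List.min?_eq_none_iff _ _).mp hx) hne
    · exact ⟨m, rfl⟩
  obtain ⟨pM, hiM⟩ : ∃ pM, PySem.List.index? data M = some pM := by
    rcases hx : PySem.List.index? data M with _ | pM
    · exact absurd ((PySem.List.index?_eq_none_iff _ _).mp hx) (by simp [PySem.List.max?_mem hM])
    · exact ⟨pM, rfl⟩
  obtain ⟨pm, him⟩ : ∃ pm, PySem.List.index? data m = some pm := by
    rcases hx : PySem.List.index? data m with _ | pm
    · exact absurd ((PySem.List.index?_eq_none_iff _ _).mp hx) (by simp [PySem.List.min?_mem hm])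
    · exact ⟨pm, rfl⟩
  exact ⟨M, m, pM, pm, hne, hM, hm, hiM, him⟩

theorem main_lemma : ∀ (data : List Int), find_max_val data = find_max_val_alt data := by
  intro data
  induction data using find_max_val.induct with
  | case1 data h =>
    have hne : data = [] := by simpa [List.isEmpty_iff] using h
    subst hne
    simp [find_max_val, find_max_val_alt]
  | case2 data h _max _min hcond =>
    obtain ⟨M, m, pM, pm, hne, hM, hm, hiM, him⟩ := resolve data h
    rw [find_max_val]
    simp only [_max, _min, hM, hm, hiM, him, Option.getD_some] at hcond
    simp only [h, dite_false, Bool.false_eq_true, hM, hm, hiM, him,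
      Option.getD_some]
    rw [if_pos hcond]
    exact (alt_of_gt data M m pM pm hne hM hm hiM him hcond).symm
  | case3 data h _max _min hcond ih =>
    obtain ⟨M, m, pM, pm, hne, hM, hm, hiM, him⟩ := resolve data h
    rw [find_max_val]
    simp only [_max, _min, hM, hm, hiM, him, Option.getD_some] at hcond ih
    simp only [h, dite_false, Bool.false_eq_true, hM, hm, hiM, him,
      Option.getD_some]
    rw [if_neg hcond]
    have hrm := PySem.List.remove?_eq_some_erase _ _ (PySem.List.max?_mem hM)
    rw [hrm] at ih ⊢
    simp only [Option.getD_some] at ih ⊢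
    rw [ih]
    exact alt_erase data M m pM pm hne hM hm hiM him (by omega)

-- ===== VERDICT (by name: the statement is the Claim_ definition above) =====
theorem find_max_val_spec : Claim_equal_find_max_val := by
  intro data _
  exact main_lemma data
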